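-- pv_equiv track=rewrite | github.com/nuggetswise/whatsapp | core/whatsapp_prompt.py | _clean_review_text
-- ===== SOURCE A (Python) =====
-- def _clean_review_text(text: str) -> str:
--     """Clean and format review text for WhatsApp."""
--     if not text:
--         return "Review could not be generated from newsletter content."
--
--     # Remove markdown formatting that doesn't work well in WhatsApp
--     text = text.replace('**', '*')
--     text = text.replace('##', '*')
--     text = text.replace('###', '')
--
--     # Clean up extra whitespace but preserve structure
--     lines = []
--     for line in text.split('\n'):
--         line = line.strip()
--         if line:  # Keep non-empty lines
--             lines.append(line)
--         elif lines and lines[-1]:  # Add empty line only if previous line wasn't empty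
--             lines.append('')
--
--     # Remove trailing empty lines
--     while lines and not lines[-1]:
--         lines.pop()
--
--     return '\n'.join(lines)
-- ===== SOURCE B (Python) =====
-- def _clean_review_text(text: str) -> str:
--     """Clean and format review text for WhatsApp."""
--     if not text:
--         return "Review could not be generated from newsletter content."
--
--     # Same markdown fixes as before
--     text = text.replace('**', '*')
--     text = text.replace('##', '*')
--     text = text.replace('###', '')
--
--     # Group stripped non-empty lines into paragraphs, then join
--     # paragraphs with a single blank line: this replaces the
--     # maintain-a-list / pop-trailing bookkeeping entirely.
--     paragraphs = []
--     current = []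
--     for line in text.split('\n'):
--         line = line.strip()
--         if line:
--             current.append(line)
--         elif current:
--             paragraphs.append(current)
--             current = []
--     if current:
--         paragraphs.append(current)
--
--     return '\n\n'.join('\n'.join(p) for p in paragraphs)
-- ===== Notes on version B (the rewrite author's own statement) =====
-- stated objective: alternative
-- what changed: Replaces A's single-list bookkeeping (conditionally appending empty separator lines and popping trailing blanks afterwards) with a paragraph-grouping pass: stripped non-empty lines are grouped into paragraphs, which are then joined with one blank line between paragraphs, so no separator lines or trailing cleanup are ever materialised.
import Mathlib
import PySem

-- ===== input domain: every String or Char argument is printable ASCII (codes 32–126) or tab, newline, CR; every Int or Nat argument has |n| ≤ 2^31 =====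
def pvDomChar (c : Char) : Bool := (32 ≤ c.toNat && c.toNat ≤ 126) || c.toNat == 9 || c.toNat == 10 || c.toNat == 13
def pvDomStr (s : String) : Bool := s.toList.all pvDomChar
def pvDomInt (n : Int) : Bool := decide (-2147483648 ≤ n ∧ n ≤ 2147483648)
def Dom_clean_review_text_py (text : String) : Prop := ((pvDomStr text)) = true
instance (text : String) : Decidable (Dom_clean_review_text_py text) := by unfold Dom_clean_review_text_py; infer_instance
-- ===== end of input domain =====

-- B groups the stripped non-empty lines into paragraphs and joins them with '\n\n',
-- replacing A's maintain-a-list / pop-trailing bookkeeping (objective: alternative decomposition).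

-- ===== PORT A =====
-- A's loop body: strip, keep non-empty lines, add '' only after a non-empty line
def pvStepA (lines : List String) (line : String) : List String :=
  let line := PySem.Str.strip line
  if line ≠ "" then lines ++ [line]
  else if lines ≠ [] ∧ lines.getLastD "" ≠ "" then lines ++ [""]
  else lines

-- A's 'while lines and not lines[-1]: lines.pop()' loop
def pvPopTrailing (lines : List String) : List String :=
  if h : lines ≠ [] ∧ lines.getLastD "" = "" then
    pvPopTrailing lines.dropLast
  else lines
termination_by lines.length
decreasing_by
  cases lines with
  | nil => exact absurd rfl h.1
  | cons a l => simp

def clean_review_text_py (text : String) : String :=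
  if text = "" then "Review could not be generated from newsletter content."
  else
    let t := PySem.Str.replace text "**" "*"
    let t := PySem.Str.replace t "##" "*"
    let t := PySem.Str.replace t "###" ""
    -- text.split('\n'): sep "\n" ≠ "" so split? is always some
    let lines := ((PySem.Str.split? t "\n").getD []).foldl pvStepA []
    PySem.Str.join "\n" (pvPopTrailing lines)

-- ===== PORT B =====
-- B's loop body: extend the current paragraph, or close it on a blank line
def pvStepB (st : List (List String) × List String) (line : String) : List (List String) × List String :=
  let line := PySem.Str.strip line
  if line ≠ "" then (st.1, st.2 ++ [line])
  else if st.2 ≠ [] then (st.1 ++ [st.2], [])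
  else st

def clean_review_text_py_alt (text : String) : String :=
  if text = "" then "Review could not be generated from newsletter content."
  else
    let t := PySem.Str.replace text "**" "*"
    let t := PySem.Str.replace t "##" "*"
    let t := PySem.Str.replace t "###" ""
    let st := ((PySem.Str.split? t "\n").getD []).foldl pvStepB ([], [])
    let paragraphs := if st.2 ≠ [] then st.1 ++ [st.2] else st.1
    PySem.Str.join "\n\n" (paragraphs.map (fun p => PySem.Str.join "\n" p))

-- ===== PRECONDITION & SPEC =====
def Spec_clean_review_text_py (text : String) (out : String) : Prop := out = clean_review_text_py_alt text
instance (text : String) (out : String) : Decidable (Spec_clean_review_text_py text out) := by unfold Spec_clean_review_text_py; infer_instance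

-- ===== CLAIM (what is proved, stated in full; the proofs are below) =====
def Claim_equal_clean_review_text_py : Prop := ∀ (text : String), Dom_clean_review_text_py text → Spec_clean_review_text_py text (clean_review_text_py text)

-- ===== LEMMAS AND PROOFS =====

-- flatten a list of groups with a single separator element between groups
def pvJsep {α : Type} (e : α) : List (List α) → List α
  | [] => []
  | [g] => g
  | g :: gs => g ++ [e] ++ pvJsep e gs

-- the A-side lines list determined by B's state
def pvI (ps : List (List String)) (cur : List String) : List String :=
  if cur ≠ [] then pvJsep "" (ps ++ [cur])
  else if ps = [] then [] else pvJsep "" ps ++ [""]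

def pvInv (ps : List (List String)) (cur : List String) : Prop :=
  (∀ g ∈ ps, g ≠ [] ∧ ∀ s ∈ g, s ≠ "") ∧ (∀ s ∈ cur, s ≠ "")

theorem pvJsep_append_singleton {α : Type} (e : α) (ps : List (List α)) (g : List α) :
    pvJsep e (ps ++ [g]) = if ps = [] then g else pvJsep e ps ++ [e] ++ g := by
  induction ps with
  | nil => simp [pvJsep]
  | cons a l ih =>
    cases l with
    | nil => simp [pvJsep]
    | cons b l' =>
      simp only [List.cons_append, pvJsep, List.cons_ne_nil, if_false] at ih ⊢
      rw [ih]
      simp [List.append_assoc]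

theorem pvJsep_ne_nil {α : Type} (e : α) (ps : List (List α)) (h : ps ≠ []) (hg : ∀ g ∈ ps, g ≠ []) :
    pvJsep e ps ≠ [] := by
  cases ps with
  | nil => exact absurd rfl h
  | cons a l =>
    cases l with
    | nil => simpa [pvJsep] using hg a (by simp)
    | cons b l' => simp [pvJsep]

theorem pvJ_getLast? (ps : List (List String)) (g : List String) (hg : g ≠ []) :
    (pvJsep "" (ps ++ [g])).getLast? = g.getLast? := by
  rw [pvJsep_append_singleton]
  split_ifs with h
  · rfl
  · rw [List.getLast?_append_of_ne_nil _ hg]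

theorem pvPopTrailing_eq_self (l : List String) (h : l.getLastD "" ≠ "") :
    pvPopTrailing l = l := by
  rw [pvPopTrailing, dif_neg]
  rintro ⟨-, h2⟩; exact h h2

theorem pvPopTrailing_nil : pvPopTrailing [] = [] := by
  rw [pvPopTrailing]; simp

-- the last line of pvI ps cur with cur ≠ [] is the (non-empty) last line of cur
theorem pvLastD_ne (g : List String) (hg : g ≠ []) (h2 : ∀ s ∈ g, s ≠ "") :
    g.getLast?.getD "" ≠ "" := by
  cases hcl : g.getLast? with
  | none => rw [List.getLast?_eq_none_iff] at hcl; exact absurd hcl hg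
  | some x => simpa using h2 x (List.mem_of_getLast? hcl)

theorem pvI_getLastD (ps : List (List String)) (cur : List String) (hc : cur ≠ [])
    (h2 : ∀ s ∈ cur, s ≠ "") : (pvI ps cur).getLastD "" ≠ "" := by
  unfold pvI
  rw [if_pos hc, List.getLastD_eq_getLast?, pvJ_getLast? _ _ hc]
  exact pvLastD_ne cur hc h2

-- appending a non-empty line
theorem pvI_append (ps : List (List String)) (cur : List String) (s : String) :
    pvI ps cur ++ [s] = pvI ps (cur ++ [s]) := by
  unfold pvI
  by_cases hc : cur = []
  · subst hc
    simp only [ne_eq, not_true_eq_false, if_false, List.nil_append,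
      List.cons_ne_nil, not_false_eq_true, if_true, pvJsep_append_singleton]
    split_ifs with h
    · simp [h]
    · simp
  · rw [if_pos hc, if_pos (by simp), pvJsep_append_singleton, pvJsep_append_singleton]
    split_ifs with h
    · simp
    · simp

-- step lemma: A's fold state tracks B's through pvI
theorem pvStep_sim (ls : List String) :
    ∀ ps cur, pvInv ps cur →
      ls.foldl pvStepA (pvI ps cur) = pvI (ls.foldl pvStepB (ps, cur)).1 (ls.foldl pvStepB (ps, cur)).2
      ∧ pvInv (ls.foldl pvStepB (ps, cur)).1 (ls.foldl pvStepB (ps, cur)).2 := by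
  induction ls with
  | nil => intro ps cur h; exact ⟨rfl, h⟩
  | cons l ls ih =>
    intro ps cur h
    simp only [List.foldl_cons]
    by_cases hl : PySem.Str.strip l = ""
    · by_cases hc : cur = []
      · have hA : pvStepA (pvI ps cur) l = pvI ps cur := by
          subst hc
          unfold pvStepA
          rw [if_neg (by simpa using hl), if_neg]
          rintro ⟨h1, h2⟩
          unfold pvI at h1 h2
          simp only [ne_eq, not_true_eq_false, if_false] at h1 h2
          by_cases hp : ps = []
          · rw [if_pos hp] at h1; exact h1 rfl
          · rw [if_neg hp] at h2
            rw [List.getLastD_eq_getLast?, List.getLast?_append_of_ne_nil _ (by simp)] at h2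
            simp at h2
        have hB : pvStepB (ps, cur) l = (ps, cur) := by
          unfold pvStepB; simp [hl, hc]
        rw [hA, hB]; exact ih ps cur h
      · have hne : pvI ps cur ≠ [] := by
          unfold pvI; rw [if_pos hc]
          refine pvJsep_ne_nil _ _ (by simp) ?_
          intro g hgm
          rcases List.mem_append.mp hgm with h1 | h1
          · exact (h.1 g h1).1
          · simp at h1; subst h1; exact hc
        have hA : pvStepA (pvI ps cur) l = pvI (ps ++ [cur]) [] := by
          unfold pvStepA
          rw [if_neg (by simpa using hl), if_pos ⟨hne, pvI_getLastD ps cur hc h.2⟩]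
          unfold pvI
          simp [hc]
        have hB : pvStepB (ps, cur) l = (ps ++ [cur], []) := by
          unfold pvStepB; simp [hl, hc]
        rw [hA, hB]
        refine ih _ _ ⟨?_, by simp⟩
        intro g hg
        rcases List.mem_append.mp hg with h1 | h1
        · exact h.1 g h1
        · simp at h1; subst h1; exact ⟨hc, h.2⟩
    · have hA : pvStepA (pvI ps cur) l = pvI ps (cur ++ [PySem.Str.strip l]) := by
        unfold pvStepA
        rw [if_pos (by simpa using hl)]
        exact pvI_append ps cur _
      have hB : pvStepB (ps, cur) l = (ps, cur ++ [PySem.Str.strip l]) := by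
        unfold pvStepB; simp [hl]
      rw [hA, hB]
      refine ih _ _ ⟨h.1, ?_⟩
      intro s hs
      rcases List.mem_append.mp hs with h1 | h1
      · exact h.2 s h1
      · simp at h1; subst h1; exact hl

-- joining two non-empty runs at the Chars level
theorem pvJoin_append_group (nl : List Char) (g t : List (List Char)) (hg : g ≠ []) (ht : t ≠ []) :
    PySem.Chars.join nl (g ++ t) = PySem.Chars.join nl g ++ nl ++ PySem.Chars.join nl t := by
  induction g with
  | nil => exact absurd rfl hg
  | cons a g' ih =>
    cases g' with
    | nil =>
      cases t with
      | nil => exact absurd rfl ht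
      | cons b t' => simp [PySem.Chars.join_singleton, PySem.Chars.join_cons_cons]
    | cons c g'' =>
      have h1 := ih (by simp)
      simp only [List.cons_append] at h1 ⊢
      rw [PySem.Chars.join_cons_cons, h1, PySem.Chars.join_cons_cons]
      simp

-- the key join identity, at the Chars level
theorem pvJoin_J_chars (gs : List (List (List Char))) (hg : ∀ g ∈ gs, g ≠ []) :
    PySem.Chars.join ['\n'] (pvJsep [] gs)
      = PySem.Chars.join ['\n', '\n'] (gs.map (PySem.Chars.join ['\n'])) := by
  induction gs with
  | nil => simp [pvJsep, PySem.Chars.join_nil]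
  | cons g gs ih =>
    cases gs with
    | nil => simp [pvJsep, PySem.Chars.join_singleton]
    | cons g2 gs2 =>
      have hJ : pvJsep ([] : List Char) (g2 :: gs2) ≠ [] :=
        pvJsep_ne_nil _ _ (by simp) (fun x hx => hg x (by simp [hx]))
      have hgne : g ≠ [] := hg g (by simp)
      rw [show pvJsep ([] : List Char) (g :: g2 :: gs2) = g ++ ([[]] ++ pvJsep [] (g2 :: gs2)) by
            simp [pvJsep]]
      rw [pvJoin_append_group _ _ _ hgne (by simp)]
      cases hJc : pvJsep ([] : List Char) (g2 :: gs2) with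
      | nil => exact absurd hJc hJ
      | cons j js =>
        rw [show ([[]] ++ (j :: js) : List (List Char)) = [] :: j :: js by simp,
            PySem.Chars.join_cons_cons]
        rw [← hJc, ih (fun x hx => hg x (by simp [hx]))]
        simp [PySem.Chars.join_cons_cons]

-- lifted to String joins
theorem pvJoin_J (gs : List (List String)) (hg : ∀ g ∈ gs, g ≠ []) :
    PySem.Str.join "\n" (pvJsep "" gs)
      = PySem.Str.join "\n\n" (gs.map (fun p => PySem.Str.join "\n" p)) := by
  apply String.toList_inj.mp
  rw [PySem.Str.toList_join, PySem.Str.toList_join]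
  have hmapJ : ∀ gs' : List (List String),
      (pvJsep "" gs').map String.toList = pvJsep [] (gs'.map (List.map String.toList)) := by
    intro gs'
    induction gs' with
    | nil => simp [pvJsep]
    | cons a l ihm =>
      cases l with
      | nil => simp [pvJsep]
      | cons b l' => simp only [pvJsep, List.map_append, List.map_cons, ihm]; simp
  rw [hmapJ, show ("\n" : String).toList = ['\n'] from rfl,
      show ("\n\n" : String).toList = ['\n', '\n'] from rfl]
  have hg' : ∀ g ∈ gs.map (List.map String.toList), g ≠ [] := by
    intro g hgm
    rcases List.mem_map.mp hgm with ⟨g0, hg0, rfl⟩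
    simpa using hg g0 hg0
  rw [pvJoin_J_chars _ hg']
  simp [List.map_map, Function.comp_def, PySem.Str.toList_join]

theorem pvFinal (ps : List (List String)) (cur : List String) (h : pvInv ps cur) :
    PySem.Str.join "\n" (pvPopTrailing (pvI ps cur)) =
    PySem.Str.join "\n\n" ((if cur ≠ [] then ps ++ [cur] else ps).map (fun p => PySem.Str.join "\n" p)) := by
  by_cases hc : cur = []
  · subst hc
    simp only [ne_eq, not_true_eq_false, if_false]
    by_cases hp : ps = []
    · subst hp
      rw [show pvI [] [] = [] from rfl, pvPopTrailing_nil]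
      rfl
    · rw [show pvI ps [] = pvJsep "" ps ++ [""] by unfold pvI; simp [hp]]
      rw [pvPopTrailing, dif_pos ⟨by simp, by rw [List.getLastD_eq_getLast?,
            List.getLast?_append_of_ne_nil _ (by simp)]; rfl⟩, List.dropLast_concat]
      rcases List.eq_nil_or_concat ps with hps | ⟨ps', g, hps⟩
      · exact absurd hps hp
      · rw [pvPopTrailing_eq_self]
        · exact pvJoin_J ps (fun g hgm => (h.1 g hgm).1)
        · rw [hps, List.concat_eq_append, List.getLastD_eq_getLast?,
              pvJ_getLast? _ _ (h.1 g (by simp [hps])).1]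
          exact pvLastD_ne g (h.1 g (by simp [hps])).1 (h.1 g (by simp [hps])).2
  · rw [if_pos hc, show pvI ps cur = pvJsep "" (ps ++ [cur]) by unfold pvI; rw [if_pos hc]]
    rw [pvPopTrailing_eq_self _ (by
      have := pvI_getLastD ps cur hc h.2
      unfold pvI at this; rwa [if_pos hc] at this)]
    refine pvJoin_J _ (fun g hgm => ?_)
    rcases List.mem_append.mp hgm with h1 | h1
    · exact (h.1 g h1).1
    · simp at h1; subst h1; exact hc

-- ===== VERDICT (by name: the statement is the Claim_ definition above) =====
theorem clean_review_text_py_spec : Claim_equal_clean_review_text_py := by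
  intro text _
  unfold Spec_clean_review_text_py clean_review_text_py clean_review_text_py_alt
  by_cases ht : text = ""
  · simp [ht]
  · rw [if_neg ht, if_neg ht]
    obtain ⟨heq, hinv⟩ := pvStep_sim
      ((PySem.Str.split? (PySem.Str.replace (PySem.Str.replace
        (PySem.Str.replace text "**" "*") "##" "*") "###" "") "\n").getD [])
      [] [] ⟨by simp [pvInv], by simp⟩
    rw [show pvI [] [] = [] from rfl] at heq
    show PySem.Str.join "\n" (pvPopTrailing (List.foldl pvStepA []
      ((PySem.Str.split? (PySem.Str.replace (PySem.Str.replace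
        (PySem.Str.replace text "**" "*") "##" "*") "###" "") "\n").getD []))) = _
    rw [heq]
    exact pvFinal _ _ hinv
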